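-- pv_equiv track=rewrite | github.com/SugarGuan/URL-DeepLearning-Detect | domain/length.py | max_continuous_numbers
-- ===== SOURCE A (Python) =====
-- def max_continuous_numbers(url):
--     if len(url) == 0:
--         return 0
--     count = 0
--     result = 0
--     for index in range(0, len(url)):
--         if index == 0:
--             if url[index].isdigit():
--                 count = 1
--                 result = 1
--         else:
--             if url[index].isdigit():
--                 if url[index - 1].isdigit():
--                     count = count + 1
--                 else:
--                     count = 1
--             else:
--                 count = 0
--
--             if count >= result:
--                 result = count
--     return result
-- ===== SOURCE B (Python) =====
-- def max_continuous_numbers(url):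
--     # Run-length encode the string by isdigit class, then take the longest digit run.
--     runs = []
--     for ch in url:
--         d = ch.isdigit()
--         if runs and runs[-1][0] == d:
--             runs[-1] = (d, runs[-1][1] + 1)
--         else:
--             runs.append((d, 1))
--     return max((n for d, n in runs if d), default=0)
-- ===== Notes on version B (the rewrite author's own statement) =====
-- stated objective: idiomatic
-- what changed: A's single index loop with explicit previous-character checks and a running count/result pair is replaced by first run-length encoding the string by isdigit class and then taking the max over the digit-run lengths (default 0).
import Mathlib
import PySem

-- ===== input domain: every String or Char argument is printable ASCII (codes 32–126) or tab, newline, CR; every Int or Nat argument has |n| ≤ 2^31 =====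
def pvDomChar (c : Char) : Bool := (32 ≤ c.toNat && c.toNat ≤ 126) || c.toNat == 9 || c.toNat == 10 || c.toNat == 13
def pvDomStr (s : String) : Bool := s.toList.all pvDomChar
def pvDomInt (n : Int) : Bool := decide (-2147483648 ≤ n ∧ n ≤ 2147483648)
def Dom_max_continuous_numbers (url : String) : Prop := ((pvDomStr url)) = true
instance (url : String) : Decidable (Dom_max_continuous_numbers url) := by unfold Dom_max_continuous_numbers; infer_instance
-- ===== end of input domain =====

-- B replaces A's index loop with explicit previous-character checks by a run-length
-- encoding of the string followed by a max over the digit runs (different decomposition,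
-- same cost); the return values are proved equal on all inputs.

-- ===== PORT A =====
-- loop body of A's 'for index in range(0, len(url))', extracted as a helper
def pvBodyA (cs : List Char) (p : Int × Int) (index : Int) : Int × Int :=
  if index == 0 then
    if PySem.Chars.isdigit (PySem.List.pyGetD cs index ' ') then (1, 1) else p
  else
    if PySem.Chars.isdigit (PySem.List.pyGetD cs index ' ') then
      let count := if PySem.Chars.isdigit (PySem.List.pyGetD cs (index - 1) ' ') then p.1 + 1 else 1
      (count, if count ≥ p.2 then count else p.2)
    else
      (0, if (0 : Int) ≥ p.2 then 0 else p.2)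

def max_continuous_numbers (url : String) : Int :=
  if PySem.Str.len url == 0 then 0
  else ((PySem.List.pyRange 0 (PySem.Str.len url)).foldl (pvBodyA url.toList) (0, 0)).2

-- ===== PORT B =====
-- loop body of B's 'for ch in url' building the run-length encoding
def pvBodyB (runs : List (Bool × Int)) (ch : Char) : List (Bool × Int) :=
  let d := PySem.Chars.isdigit ch
  match runs.getLast? with
  | some (b, n) => if b == d then runs.dropLast ++ [(d, n + 1)] else runs ++ [(d, 1)]
  | none => runs ++ [(d, 1)]

def max_continuous_numbers_alt (url : String) : Int :=
  PySem.List.maxD (((url.toList.foldl pvBodyB []).filter (fun r => r.1)).map (fun r => r.2))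
    (fun x => x) 0

-- ===== PRECONDITION & SPEC =====
def Spec_max_continuous_numbers (url : String) (out : Int) : Prop := out = max_continuous_numbers_alt url
instance (url : String) (out : Int) : Decidable (Spec_max_continuous_numbers url out) := by unfold Spec_max_continuous_numbers; infer_instance

-- ===== CLAIM (what is proved, stated in full; the proofs are below) =====
def Claim_equal_max_continuous_numbers : Prop := ∀ (url : String), Dom_max_continuous_numbers url → Spec_max_continuous_numbers url (max_continuous_numbers url)

-- ===== LEMMAS AND PROOFS =====

-- canonical one-pass state: (length of trailing digit run, longest digit run so far)
def pvStep (p : Int × Int) (c : Char) : Int × Int :=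
  if PySem.Chars.isdigit c then (p.1 + 1, max p.2 (p.1 + 1)) else (0, p.2)

def pvS (cs : List Char) : Int × Int := cs.foldl pvStep (0, 0)

theorem pvS_append (cs : List Char) (c : Char) : pvS (cs ++ [c]) = pvStep (pvS cs) c := by
  simp [pvS, List.foldl_append]

theorem pvS_bounds (cs : List Char) : 0 ≤ (pvS cs).1 ∧ (pvS cs).1 ≤ (pvS cs).2 := by
  suffices h : ∀ (cs : List Char) (p : Int × Int), 0 ≤ p.1 → p.1 ≤ p.2 →
      0 ≤ (cs.foldl pvStep p).1 ∧ (cs.foldl pvStep p).1 ≤ (cs.foldl pvStep p).2 by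
    exact h cs (0, 0) le_rfl le_rfl
  intro cs
  induction cs with
  | nil => intro p h1 h2; exact ⟨h1, h2⟩
  | cons c t ih =>
    intro p h1 h2
    simp only [List.foldl_cons]
    by_cases hd : PySem.Chars.isdigit c
    · refine ih _ ?_ ?_ <;> simp [pvStep, hd] <;> omega
    · refine ih _ ?_ ?_ <;> simp [pvStep, hd]
      omega
  
theorem pvS_trail_zero (cs : List Char) (c : Char) (h : PySem.Chars.isdigit c = false) :
    (pvS (cs ++ [c])).1 = 0 := by
  simp [pvS_append, pvStep, h]

-- A's index fold equals the canonical one-pass fold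
theorem pvA_eq_S (cs : List Char) :
    (PySem.List.pyRange 0 (cs.length : Int)).foldl (pvBodyA cs) (0, 0) = pvS cs := by
  induction cs using List.reverseRecOn with
  | nil =>
    rw [show ((([] : List Char).length : Int)) = 0 by simp,
      show PySem.List.pyRange 0 0 = [] from by decide]
    rfl
  | append_singleton cs c ih =>
    have hn : (0 : Int) ≤ (cs.length : Int) := by positivity
    rw [show (((cs ++ [c]).length : Int)) = (cs.length : Int) + 1 by simp,
      PySem.List.pyRange_one_succ_right hn, List.foldl_append]
    have hget : ∀ j : Int, 0 ≤ j → j < (cs.length : Int) →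
        PySem.List.pyGetD (cs ++ [c]) j ' ' = PySem.List.pyGetD cs j ' ' := by
      intro j hj0 hjlt
      rw [PySem.List.pyGetD_of_nonneg _ _ hj0, PySem.List.pyGetD_of_nonneg _ _ hj0,
        List.getD_append _ _ _ _ (by omega)]
    have hcongr : (PySem.List.pyRange 0 (cs.length : Int)).foldl (pvBodyA (cs ++ [c])) (0, 0)
        = (PySem.List.pyRange 0 (cs.length : Int)).foldl (pvBodyA cs) (0, 0) := by
      apply PySem.List.foldl_congr_mem
      intro acc i hi
      rw [PySem.List.mem_pyRange_one] at hi
      by_cases h0 : i = 0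
      · subst h0
        simp only [pvBodyA, beq_self_eq_true, if_true, hget 0 le_rfl hi.2]
      · have hb : (i == (0 : Int)) = false := by simp [h0]
        simp only [pvBodyA, hb, Bool.false_eq_true, if_false,
          hget i hi.1 hi.2, hget (i - 1) (by omega) (by omega)]
    rw [hcongr, ih, List.foldl_cons, List.foldl_nil, pvS_append]
    have hbounds := pvS_bounds cs
    rcases List.eq_nil_or_concat cs with hnil | ⟨cs', c', hcs⟩
    · subst hnil
      have hgetc : PySem.List.pyGetD ([] ++ [c]) (0 : Int) ' ' = c := by
        rw [PySem.List.pyGetD_of_nonneg _ _ le_rfl]; rfl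
      cases hd : PySem.Chars.isdigit c <;>
        simp [pvBodyA, pvS, pvStep, hd]
    · rw [List.concat_eq_append] at hcs
      have hlen2 : cs.length = cs'.length + 1 := by rw [hcs]; simp
      have hne : ¬ (((cs.length : Int) == 0) = true) := by
        simp only [beq_iff_eq, Nat.cast_eq_zero]; omega
      have hgetc : PySem.List.pyGetD (cs ++ [c]) ((cs.length : Int)) ' ' = c := by
        rw [PySem.List.pyGetD_of_nonneg _ _ hn, Int.toNat_natCast,
          List.getD_append_right _ _ _ _ le_rfl]
        simp
      have hgetp : PySem.List.pyGetD (cs ++ [c]) ((cs.length : Int) - 1) ' ' = c' := by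
        have h1 : (0 : Int) ≤ (cs.length : Int) - 1 := by omega
        rw [PySem.List.pyGetD_of_nonneg _ _ h1,
          List.getD_append _ _ _ _ (by omega)]
        have h2 : ((cs.length : Int) - 1).toNat = cs'.length := by omega
        rw [h2, hcs, List.getD_append_right _ _ _ _ le_rfl]
        simp
      simp only [pvBodyA, pvStep]
      rw [if_neg hne, hgetc, hgetp]
      cases hd : PySem.Chars.isdigit c
      · simp only [Bool.false_eq_true, if_false, Prod.mk.injEq]
        refine ⟨by trivial, ?_⟩
        split_ifs <;> omega
      · simp only [if_true]
        cases hd' : PySem.Chars.isdigit c'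
        · have htr : (pvS cs).1 = 0 := by rw [hcs]; exact pvS_trail_zero cs' c' hd'
          simp only [Bool.false_eq_true, if_false, Prod.mk.injEq]
          refine ⟨by omega, ?_⟩
          split_ifs <;> omega
        · simp only [if_true, Prod.mk.injEq]
          refine ⟨by trivial, ?_⟩
          split_ifs <;> omega

-- B's run list: last-run length, max over digit runs, positivity of run lengths
def pvLastRun (rs : List (Bool × Int)) : Int :=
  match rs.getLast? with
  | some (true, n) => n
  | _ => 0

def pvMfold (rs : List (Bool × Int)) : Int :=
  ((rs.filter (fun r => r.1)).map (fun r => r.2)).foldl max 0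

theorem pvLastRun_concat (D : List (Bool × Int)) (b : Bool) (n : Int) :
    pvLastRun (D ++ [(b, n)]) = if b then n else 0 := by
  cases b <;> simp [pvLastRun]

theorem pvMfold_concat (D : List (Bool × Int)) (b : Bool) (n : Int) :
    pvMfold (D ++ [(b, n)]) = if b then max (pvMfold D) n else pvMfold D := by
  cases b <;> simp [pvMfold, List.filter_append, List.map_append, List.foldl_append]

theorem pvB_inv (cs : List Char) :
    pvLastRun (cs.foldl pvBodyB []) = (pvS cs).1 ∧
    pvMfold (cs.foldl pvBodyB []) = (pvS cs).2 ∧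
    (∀ r ∈ cs.foldl pvBodyB [], 1 ≤ r.2) := by
  induction cs using List.reverseRecOn with
  | nil =>
    refine ⟨rfl, rfl, ?_⟩
    intro r hr; simp at hr
  | append_singleton cs c ih =>
    obtain ⟨h1, h2, h3⟩ := ih
    rw [List.foldl_append, List.foldl_cons, List.foldl_nil]
    set rs := cs.foldl pvBodyB [] with hrs
    rw [pvS_append]
    rcases List.eq_nil_or_concat rs with hnil | ⟨D, r0, hcon⟩
    · rw [hnil] at h1 h2 ⊢
      have hB : pvBodyB [] c = [(PySem.Chars.isdigit c, 1)] := by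
        simp [pvBodyB]
      rw [hB]
      rw [show pvLastRun ([] : List (Bool × Int)) = 0 from rfl] at h1
      rw [show pvMfold ([] : List (Bool × Int)) = 0 from rfl] at h2
      cases hd : PySem.Chars.isdigit c
      · refine ⟨?_, ?_, ?_⟩
        · rw [show pvLastRun [(false, 1)] = 0 from rfl]; simp [pvStep, hd]
        · rw [show pvMfold [(false, 1)] = 0 from rfl]; simp [pvStep, hd, ← h2]
        · intro r hr; simp at hr; rw [hr]
      · refine ⟨?_, ?_, ?_⟩
        · rw [show pvLastRun [(true, 1)] = 1 from rfl]; simp [pvStep, hd]; omega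
        · rw [show pvMfold [(true, 1)] = 1 from rfl]; simp [pvStep, hd]; omega
        · intro r hr; simp at hr; rw [hr]
    · obtain ⟨b, n⟩ := r0
      rw [List.concat_eq_append] at hcon
      have hpos : 1 ≤ n := h3 (b, n) (by rw [hcon]; simp)
      have hDmem : ∀ r ∈ D, 1 ≤ r.2 := by
        intro r hr; exact h3 r (by rw [hcon]; exact List.mem_append.mpr (Or.inl hr))
      have hB : pvBodyB rs c =
          if b == PySem.Chars.isdigit c then D ++ [(PySem.Chars.isdigit c, n + 1)]
          else rs ++ [(PySem.Chars.isdigit c, 1)] := by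
        conv_lhs => rw [hcon]
        simp only [pvBodyB, List.getLast?_concat, List.dropLast_concat]
        rw [← hcon]
      rw [hcon, pvLastRun_concat] at h1
      rw [hcon, pvMfold_concat] at h2
      cases hd : PySem.Chars.isdigit c
      · cases hb : b
        · -- last run non-digit, c non-digit: grow the last run
          rw [hb] at h1 h2 hcon; rw [if_neg (by decide)] at h1; rw [if_neg (by decide)] at h2
          rw [hd, hb, if_pos (by decide)] at hB
          rw [hB]
          refine ⟨?_, ?_, ?_⟩
          · rw [pvLastRun_concat]; simp [pvStep, hd]
          · rw [pvMfold_concat, if_neg (by decide)]; simp [pvStep, hd, ← h2]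
          · intro r hr
            rcases List.mem_append.mp hr with h | h
            · exact hDmem r h
            · simp at h; rw [h]; omega
        · -- last run digit, c non-digit: append a new run (false, 1)
          rw [hb] at h1 h2 hcon; rw [if_pos (by decide)] at h1; rw [if_pos (by decide)] at h2
          rw [hd, hb, if_neg (by decide)] at hB
          rw [hB]
          refine ⟨?_, ?_, ?_⟩
          · rw [pvLastRun_concat]; simp [pvStep, hd]
          · rw [pvMfold_concat, if_neg (by decide)]
            rw [hcon, pvMfold_concat, if_pos (by decide), h2]
            simp [pvStep, hd]
          · intro r hr
            rcases List.mem_append.mp hr with h | h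
            · exact h3 r h
            · simp at h; rw [h]
      · cases hb : b
        · -- last run non-digit, c digit: append a new run (true, 1)
          rw [hb] at h1 h2 hcon; rw [if_neg (by decide)] at h1; rw [if_neg (by decide)] at h2
          rw [hd, hb, if_neg (by decide)] at hB
          rw [hB]
          refine ⟨?_, ?_, ?_⟩
          · rw [pvLastRun_concat, if_pos (by decide)]
            simp only [pvStep, hd, if_true]; omega
          · rw [pvMfold_concat, if_pos (by decide)]
            rw [hcon, pvMfold_concat, if_neg (by decide), h2]
            simp only [pvStep, hd, if_true]
            omega
          · intro r hr
            rcases List.mem_append.mp hr with h | h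
            · exact h3 r h
            · simp at h; rw [h]
        · -- last run digit, c digit: grow the last run
          rw [hb] at h1 h2 hcon; rw [if_pos (by decide)] at h1; rw [if_pos (by decide)] at h2
          rw [hd, hb, if_pos (by decide)] at hB
          rw [hB]
          refine ⟨?_, ?_, ?_⟩
          · rw [pvLastRun_concat, if_pos (by decide)]
            simp only [pvStep, hd, if_true]; omega
          · rw [pvMfold_concat, if_pos (by decide)]
            simp only [pvStep, hd, if_true, ← h2, ← h1]
            omega
          · intro r hr
            rcases List.mem_append.mp hr with h | h
            · exact hDmem r h
            · simp at h; rw [h]; omega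

theorem pvMaxD_eq_fold (rs : List (Bool × Int)) (hpos : ∀ r ∈ rs, 1 ≤ r.2) :
    PySem.List.maxD ((rs.filter (fun r => r.1)).map (fun r => r.2)) (fun x => x) 0 = pvMfold rs := by
  rcases hxs : (rs.filter (fun r => r.1)).map (fun r => r.2) with _ | ⟨x, t⟩
  · rw [pvMfold, hxs]
    simp only [PySem.List.maxD]
    rw [show PySem.List.max? ([] : List Int) (fun x => x) = none from rfl]
    rfl
  · have hx1 : 1 ≤ x := by
      have hx : x ∈ (rs.filter (fun r => r.1)).map (fun r => r.2) := by rw [hxs]; simp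
      obtain ⟨r, hrf, rfl⟩ := List.mem_map.mp hx
      exact hpos r (List.mem_filter.mp hrf).1
    rw [pvMfold, hxs]
    simp only [PySem.List.maxD, PySem.List.max?_id_cons, Option.getD_some, List.foldl_cons]
    rw [max_eq_right (by omega : (0 : Int) ≤ x)]

-- ===== VERDICT (by name: the statement is the Claim_ definition above) =====
theorem max_continuous_numbers_spec : Claim_equal_max_continuous_numbers := by
  intro url _
  unfold Spec_max_continuous_numbers max_continuous_numbers max_continuous_numbers_alt
  obtain ⟨h1, h2, h3⟩ := pvB_inv url.toList
  rw [pvMaxD_eq_fold _ h3, h2]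
  by_cases h0 : url.toList = []
  · simp [PySem.Str.len_eq, h0, pvS]
  · have hlen : (PySem.Str.len url == 0) = false := by
      simp only [PySem.Str.len_eq, beq_eq_false_iff_ne, ne_eq, Nat.cast_eq_zero]
      exact fun h => h0 (List.length_eq_zero_iff.mp h)
    rw [hlen]
    simp only [Bool.false_eq_true, if_false]
    rw [PySem.Str.len_eq, pvA_eq_S]
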